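-- pv_equiv track=rewrite | github.com/lainanguyen/CIS322 | HW_Sets/HW_Set_2.py | distinct_pair
-- ===== SOURCE A (Python) =====
-- def distinct_pair(list1):
--     # loop within a loop
--     # [2, 5, 6, 9, 4], length of 5
--     # Three end conditions: NO ODD PRODUCT (False), 1 ODD DISTINCT PAIR (True), >1 ODD DISTINCT PAIR (False)
--     odd_nums = []   # [9, 5]
--
--     for i in range(len(list1)):
--         for j in range(i+1, len(list1)):
--             # if product is odd
--             if list1[i] * list1[j] % 2 == 1:
--                 if len(odd_nums) == 0:
--                     # add to list to save for later
--                     odd_nums.append(list1[i])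
--                     odd_nums.append(list1[j])
--                 else:
--                     # There are already nums in the list
--                     if not (list1[i] in odd_nums and list1[j] in odd_nums):
--                         return False
--
--     # return statements
--     if len(odd_nums) == 0:
--         return False
--     return True
-- ===== SOURCE B (Python) =====
-- def distinct_pair(list1):
--     # One pass: collect odd values; an odd pair exists iff there are >= 2 odds,
--     # and all odd-product pairs stay within the first recorded pair iff every
--     # odd value equals one of the first two odds seen.
--     odds = [x for x in list1 if x % 2]
--     if len(odds) < 2:
--         return False
--     a, b = odds[0], odds[1]
--     return all(x == a or x == b for x in odds)
-- ===== Notes on version B (the rewrite author's own statement) =====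
-- stated objective: faster
-- what changed: Replaced the O(n^2) double loop over all index pairs (with membership tests against the recorded pair) by a single pass that collects the odd values and checks that every odd value equals one of the first two odds.
import Mathlib
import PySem

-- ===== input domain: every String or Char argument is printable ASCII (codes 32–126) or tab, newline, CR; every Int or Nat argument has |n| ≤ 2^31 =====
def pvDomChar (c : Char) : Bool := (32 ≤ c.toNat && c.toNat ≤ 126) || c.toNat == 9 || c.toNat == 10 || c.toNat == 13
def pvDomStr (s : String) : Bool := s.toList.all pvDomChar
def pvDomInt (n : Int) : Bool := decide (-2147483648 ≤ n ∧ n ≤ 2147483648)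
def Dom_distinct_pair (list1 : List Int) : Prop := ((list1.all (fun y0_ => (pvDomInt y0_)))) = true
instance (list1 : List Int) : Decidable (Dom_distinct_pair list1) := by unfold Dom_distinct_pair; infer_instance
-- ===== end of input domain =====

-- B replaces A's all-pairs double loop by a single pass over the odd values (objective: faster).

-- ===== PORT A =====
-- inner loop `for j in range(i+1, len(list1))`: `rest` is the suffix after the outer element x;
-- `none` = Python's early `return False`, `some odd` = fall through with the current odd_nums.
def pvInnerA (x : Int) : List Int → List Int → Option (List Int)
  | [], odd => some odd
  | y :: t, odd =>
    if PySem.Int.mod (x * y) 2 = 1 then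
      if odd.length = 0 then
        pvInnerA x t (odd ++ [x, y])
      else
        if x ∈ odd ∧ y ∈ odd then pvInnerA x t odd else none
    else pvInnerA x t odd

-- outer loop `for i in range(len(list1))`: element x together with its suffix t.
def pvOuterA : List Int → List Int → Option (List Int)
  | [], odd => some odd
  | x :: t, odd =>
    match pvInnerA x t odd with
    | none => none
    | some odd' => pvOuterA t odd'

def distinct_pair (list1 : List Int) : Bool :=
  match pvOuterA list1 [] with
  | none => false
  | some odd => if odd.length = 0 then false else true

-- ===== PORT B =====
-- `x % 2` as a Python truth value
def pvOddB (x : Int) : Bool := decide (PySem.Int.mod x 2 ≠ 0)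

def distinct_pair_alt (list1 : List Int) : Bool :=
  let odds := list1.filter pvOddB
  match odds with
  | a :: b :: _ => odds.all (fun x => x == a || x == b)
  | _ => false

-- ===== PRECONDITION & SPEC =====
def Spec_distinct_pair (list1 : List Int) (out : Bool) : Prop := out = distinct_pair_alt list1
instance (list1 : List Int) (out : Bool) : Decidable (Spec_distinct_pair list1 out) := by unfold Spec_distinct_pair; infer_instance

-- ===== CLAIM (what is proved, stated in full; the proofs are below) =====
def Claim_equal_distinct_pair : Prop := ∀ (list1 : List Int), Dom_distinct_pair list1 → Spec_distinct_pair list1 (distinct_pair list1)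

-- ===== LEMMAS AND PROOFS =====

lemma pvOddB_true {z : Int} : pvOddB z = true ↔ z % 2 = 1 := by
  unfold pvOddB
  rw [decide_eq_true_iff, PySem.Int.mod_eq_emod_of_pos (by omega : (0:Int) < 2)]
  constructor <;> omega

lemma pvOddB_false {z : Int} : pvOddB z = false ↔ z % 2 = 0 := by
  rw [← Bool.not_eq_true, pvOddB_true]
  omega

lemma pvProdOdd (x y : Int) : PySem.Int.mod (x * y) 2 = 1 ↔ (x % 2 = 1 ∧ y % 2 = 1) := by
  rw [PySem.Int.mod_eq_emod_of_pos (by omega : (0:Int) < 2), Int.mul_emod]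
  have hx : x % 2 = 0 ∨ x % 2 = 1 := by omega
  have hy : y % 2 = 0 ∨ y % 2 = 1 := by omega
  rcases hx with hx | hx <;> rcases hy with hy | hy <;> simp [hx, hy]

lemma pvInner_even (x : Int) (hx : x % 2 = 0) :
    ∀ (t odd : List Int), pvInnerA x t odd = some odd := by
  intro t
  induction t with
  | nil => intro odd; rfl
  | cons y t ih =>
    intro odd
    have h : ¬ PySem.Int.mod (x * y) 2 = 1 := by rw [pvProdOdd]; omega
    simp only [pvInnerA]
    rw [if_neg h]
    exact ih odd

lemma pvInner_nonempty (x : Int) (hx : x % 2 = 1) :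
    ∀ (t odd : List Int), odd ≠ [] →
      pvInnerA x t odd =
        if ∀ y ∈ t, y % 2 = 1 → (x ∈ odd ∧ y ∈ odd) then some odd else none := by
  intro t
  induction t with
  | nil => intro odd _; simp [pvInnerA]
  | cons y t ih =>
    intro odd hodd
    have step : (∀ z ∈ t, z % 2 = 1 → (x ∈ odd ∧ z ∈ odd)) →
        ((y % 2 = 1 → (x ∈ odd ∧ y ∈ odd)) → ∀ z ∈ y :: t, z % 2 = 1 → (x ∈ odd ∧ z ∈ odd)) := by
      intro hall hy z hz
      rcases List.mem_cons.mp hz with rfl | hz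
      · exact hy
      · exact hall z hz
    have hlen : ¬ odd.length = 0 := by simpa [List.length_eq_zero_iff] using hodd
    by_cases hy : y % 2 = 1
    · have hprod : PySem.Int.mod (x * y) 2 = 1 := (pvProdOdd x y).mpr ⟨hx, hy⟩
      simp only [pvInnerA]
      rw [if_pos hprod, if_neg hlen]
      by_cases hin : x ∈ odd ∧ y ∈ odd
      · rw [if_pos hin, ih odd hodd]
        by_cases hall : ∀ z ∈ t, z % 2 = 1 → (x ∈ odd ∧ z ∈ odd)
        · rw [if_pos hall, if_pos (step hall fun _ => hin)]
        · rw [if_neg hall, if_neg]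
          intro hcon
          exact hall fun z hz => hcon z (List.mem_cons_of_mem _ hz)
      · rw [if_neg hin, if_neg]
        intro hcon
        exact hin (hcon y List.mem_cons_self hy)
    · have hprod : ¬ PySem.Int.mod (x * y) 2 = 1 := by rw [pvProdOdd]; omega
      simp only [pvInnerA]
      rw [if_neg hprod, ih odd hodd]
      by_cases hall : ∀ z ∈ t, z % 2 = 1 → (x ∈ odd ∧ z ∈ odd)
      · rw [if_pos hall, if_pos (step hall fun h1 => absurd h1 hy)]
      · rw [if_neg hall, if_neg]
        intro hcon
        exact hall fun z hz => hcon z (List.mem_cons_of_mem _ hz)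

lemma pvInner_empty_nil (x : Int) :
    ∀ (t : List Int), t.filter pvOddB = [] → pvInnerA x t [] = some [] := by
  intro t
  induction t with
  | nil => intro _; rfl
  | cons y t ih =>
    intro hf
    rw [List.filter_cons] at hf
    by_cases hy : pvOddB y = true
    · rw [if_pos hy] at hf; exact absurd hf (by simp)
    · have hy0 : y % 2 = 0 := pvOddB_false.mp (Bool.not_eq_true _ ▸ hy)
      rw [if_neg hy] at hf
      have hprod : ¬ PySem.Int.mod (x * y) 2 = 1 := by rw [pvProdOdd]; omega
      simp only [pvInnerA]
      rw [if_neg hprod]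
      exact ih hf

lemma pvInner_empty_cons (x : Int) (hx : x % 2 = 1) :
    ∀ (t : List Int) (b : Int) (rest : List Int),
      t.filter pvOddB = b :: rest →
      pvInnerA x t [] =
        if ∀ z ∈ rest, z = x ∨ z = b then some [x, b] else none := by
  intro t
  induction t with
  | nil => intro b rest hf; exact absurd hf (by simp)
  | cons w t ih =>
    intro b rest hf
    rw [List.filter_cons] at hf
    by_cases hw : pvOddB w = true
    · rw [if_pos hw] at hf
      have hwodd : w % 2 = 1 := pvOddB_true.mp hw
      injection hf with hb hrest
      subst hb
      have hprod : PySem.Int.mod (x * w) 2 = 1 := (pvProdOdd x w).mpr ⟨hx, hwodd⟩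
      simp only [pvInnerA, List.length_nil, List.nil_append]
      rw [if_pos hprod]
      simp only [if_true]
      rw [pvInner_nonempty x hx t [x, w] (by simp)]
      by_cases hall : ∀ z ∈ rest, z = x ∨ z = w
      · rw [if_pos hall, if_pos]
        intro z hz hzodd
        refine ⟨by simp, ?_⟩
        have hzf : z ∈ t.filter pvOddB := List.mem_filter.mpr ⟨hz, pvOddB_true.mpr hzodd⟩
        rw [hrest] at hzf
        rcases hall z hzf with rfl | rfl <;> simp
      · rw [if_neg hall, if_neg]
        intro hcon
        apply hall
        intro z hz
        have hz' := List.mem_filter.mp (hrest ▸ hz)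
        have := (hcon z hz'.1 (pvOddB_true.mp hz'.2)).2
        simpa using this
    · rw [if_neg hw] at hf
      have hw0 : w % 2 = 0 := pvOddB_false.mp (Bool.not_eq_true _ ▸ hw)
      have hprod : ¬ PySem.Int.mod (x * w) 2 = 1 := by rw [pvProdOdd]; omega
      simp only [pvInnerA]
      rw [if_neg hprod]
      exact ih b rest hf

lemma pvOuter_inv (odd : List Int) (hodd : odd ≠ []) :
    ∀ (t : List Int), (∀ z ∈ t, z % 2 = 1 → z ∈ odd) →
      pvOuterA t odd = some odd := by
  intro t
  induction t with
  | nil => intro _; rfl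
  | cons x t ih =>
    intro h
    by_cases hx : x % 2 = 1
    · simp only [pvOuterA]
      rw [pvInner_nonempty x hx t odd hodd, if_pos]
      · exact ih fun z hz => h z (List.mem_cons_of_mem _ hz)
      · intro z hz hzodd
        exact ⟨h x List.mem_cons_self hx, h z (List.mem_cons_of_mem _ hz) hzodd⟩
    · have hx0 : x % 2 = 0 := by omega
      simp only [pvOuterA]
      rw [pvInner_even x hx0]
      exact ih fun z hz => h z (List.mem_cons_of_mem _ hz)

-- characterisation of A's whole computation by the list of odd values
lemma pvOuter_char :
    ∀ (l : List Int),
      pvOuterA l [] =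
        match l.filter pvOddB with
        | [] => some []
        | [_] => some []
        | a :: b :: rest => if ∀ z ∈ rest, z = a ∨ z = b then some [a, b] else none := by
  intro l
  induction l with
  | nil => rfl
  | cons x t ih =>
    rw [List.filter_cons]
    by_cases hx : pvOddB x = true
    · have hxodd : x % 2 = 1 := pvOddB_true.mp hx
      rw [if_pos hx]
      cases hf : t.filter pvOddB with
      | nil =>
        simp only [pvOuterA]
        rw [pvInner_empty_nil x t hf]
        have : pvOuterA t [] = some [] := by rw [ih, hf]
        simpa using this
      | cons b rest =>
        simp only [pvOuterA]
        rw [pvInner_empty_cons x hxodd t b rest hf]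
        by_cases hall : ∀ z ∈ rest, z = x ∨ z = b
        · rw [if_pos hall]
          show pvOuterA t [x, b] = some [x, b]
          apply pvOuter_inv [x, b] (by simp)
          intro z hz hzodd
          have hzf : z ∈ t.filter pvOddB := List.mem_filter.mpr ⟨hz, pvOddB_true.mpr hzodd⟩
          rw [hf] at hzf
          rcases List.mem_cons.mp hzf with rfl | hzf
          · simp
          · rcases hall z hzf with rfl | rfl <;> simp
        · rw [if_neg hall]
    · have hx0 : x % 2 = 0 := pvOddB_false.mp (Bool.not_eq_true _ ▸ hx)
      rw [if_neg hx]
      simp only [pvOuterA]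
      rw [pvInner_even x hx0]
      exact ih

-- ===== VERDICT (by name: the statement is the Claim_ definition above) =====
theorem distinct_pair_spec : Claim_equal_distinct_pair := by
  intro l _
  unfold Spec_distinct_pair distinct_pair distinct_pair_alt
  rw [pvOuter_char l]
  cases hf : l.filter pvOddB with
  | nil => simp
  | cons a tl =>
    cases tl with
    | nil => simp
    | cons b rest =>
      by_cases hall : ∀ z ∈ rest, z = a ∨ z = b
      · simp only [if_pos hall]
        simp only [List.all_cons, beq_self_eq_true, Bool.true_or, Bool.or_true, Bool.true_and]
        rw [List.all_eq_true.mpr]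
        · simp
        · intro z hz
          rcases hall z hz with rfl | rfl <;> simp
      · simp only [if_neg hall]
        rw [eq_comm, Bool.eq_false_iff]
        intro hcon
        apply hall
        intro z hz
        have := List.all_eq_true.mp hcon
        have hz' := this z (by simp [hz])
        rcases Bool.or_eq_true_iff.mp hz' with h | h
        · exact Or.inl (by simpa using h)
        · exact Or.inr (by simpa using h)
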